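-- pv_equiv track=rewrite | github.com/0xunderl0rd/AI4H-DoomGen | local-doomgen-service/app/main.py | infer_families_from_assets
-- ===== SOURCE A (Python) =====
-- from typing import Any
--
-- def infer_families_from_assets(asset_requests: list[dict[str, Any]]) -> list[str]:
--     inferred: list[str] = []
--     for request in asset_requests:
--         kind = request.get("kind")
--         if kind == "weapon_sprite_set" and "weapon_visual" not in inferred:
--             inferred.append("weapon_visual")
--         elif kind == "enemy_sprite_set" and "enemy_visual" not in inferred:
--             inferred.append("enemy_visual")
--         elif kind == "hud_patch_set" and "presentation_fx" not in inferred: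
--             inferred.append("presentation_fx")
--         elif kind == "sound_pack" and "weapon_audio" not in inferred:
--             inferred.append("weapon_audio")
--     return inferred
-- ===== SOURCE B (Python) =====
-- _KIND_FAMILY_PAIRS = [
--     ("weapon_sprite_set", "weapon_visual"),
--     ("enemy_sprite_set", "enemy_visual"),
--     ("hud_patch_set", "presentation_fx"),
--     ("sound_pack", "weapon_audio"),
-- ]
--
-- def infer_families_from_assets(asset_requests):
--     # For each known kind, find the index of its first occurrence; then emit the
--     # families of the kinds that occur, ordered by that first-occurrence index.
--     firsts = []
--     for kind, family in _KIND_FAMILY_PAIRS: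
--         for i, request in enumerate(asset_requests):
--             if request.get("kind") == kind:
--                 firsts.append((i, family))
--                 break
--     firsts.sort(key=lambda entry: entry[0])
--     return [family for _, family in firsts]
-- ===== Notes on version B (the rewrite author's own statement) =====
-- stated objective: alternative
-- what changed: Replaces A's single accumulating pass with inline membership dedup by a per-kind algorithm: for each of the four known kinds find the index of its first occurrence, then sort the found (index, family) pairs and emit the families; correct because each kind maps to a distinct family, so first-occurrence order of families equals ascending order of first-occurrence indices of their kinds.
import Mathlib
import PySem

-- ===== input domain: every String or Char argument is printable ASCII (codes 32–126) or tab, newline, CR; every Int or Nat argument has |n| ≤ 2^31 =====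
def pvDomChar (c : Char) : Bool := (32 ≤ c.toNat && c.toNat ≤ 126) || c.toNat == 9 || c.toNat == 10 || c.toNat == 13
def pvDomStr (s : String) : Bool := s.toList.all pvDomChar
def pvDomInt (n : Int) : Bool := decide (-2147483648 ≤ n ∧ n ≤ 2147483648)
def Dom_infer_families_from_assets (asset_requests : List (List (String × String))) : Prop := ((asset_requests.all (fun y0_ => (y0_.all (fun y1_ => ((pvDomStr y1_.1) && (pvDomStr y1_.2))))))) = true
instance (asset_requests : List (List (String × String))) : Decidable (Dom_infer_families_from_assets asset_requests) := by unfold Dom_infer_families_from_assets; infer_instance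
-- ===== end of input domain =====

-- B uses a different algorithm: per-kind first-occurrence indices gathered and sorted,
-- instead of A's single accumulating pass with an inline membership check (objective: alternative).

-- ===== PORT A =====
def infer_families_from_assets (asset_requests : List (List (String × String))) : List String :=
  asset_requests.foldl (fun inferred request =>
    let kind := (PySem.Dict.mk request).get? "kind"
    if kind = some "weapon_sprite_set" ∧ "weapon_visual" ∉ inferred then
      inferred ++ ["weapon_visual"]
    else if kind = some "enemy_sprite_set" ∧ "enemy_visual" ∉ inferred then
      inferred ++ ["enemy_visual"]
    else if kind = some "hud_patch_set" ∧ "presentation_fx" ∉ inferred then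
      inferred ++ ["presentation_fx"]
    else if kind = some "sound_pack" ∧ "weapon_audio" ∉ inferred then
      inferred ++ ["weapon_audio"]
    else inferred) []

-- ===== PORT B =====
def kindFamilyPairs : List (String × String) :=
  [("weapon_sprite_set", "weapon_visual"), ("enemy_sprite_set", "enemy_visual"),
   ("hud_patch_set", "presentation_fx"), ("sound_pack", "weapon_audio")]

-- inner loop of B: 'for i, request in enumerate(asset_requests): if request.get("kind") == kind: … break'
def firstKindIndex (asset_requests : List (List (String × String))) (kind : String) : Option Int :=
  ((PySem.List.enumerate asset_requests 0).find?
      (fun e => (PySem.Dict.mk e.2).get? "kind" == some kind)).map (fun e => e.1)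

def infer_families_from_assets_alt (asset_requests : List (List (String × String))) : List String :=
  let firsts : List (Int × String) :=
    kindFamilyPairs.foldl (fun acc p =>
      match firstKindIndex asset_requests p.1 with
      | some i => acc ++ [(i, p.2)]
      | none => acc) []
  (PySem.List.sorted firsts (fun e => e.1)).map (fun e => e.2)

-- ===== PRECONDITION & SPEC =====
def Spec_infer_families_from_assets (asset_requests : List (List (String × String))) (out : List String) : Prop := out = infer_families_from_assets_alt asset_requests
instance (asset_requests : List (List (String × String))) (out : List String) : Decidable (Spec_infer_families_from_assets asset_requests out) := by unfold Spec_infer_families_from_assets; infer_instance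

-- ===== CLAIM =====
def Claim_equal_infer_families_from_assets : Prop := ∀ (asset_requests : List (List (String × String))), Dom_infer_families_from_assets asset_requests → Spec_infer_families_from_assets asset_requests (infer_families_from_assets asset_requests)

-- ===== LEMMAS AND PROOFS =====

-- proof-side vocabulary
def kindOf (r : List (String × String)) : Option String := (PySem.Dict.mk r).get? "kind"

def lookupP (P : List (String × String)) (k : String) : Option String :=
  (P.find? (fun p => p.1 == k)).map (fun p => p.2)

def famOf (P : List (String × String)) (r : List (String × String)) : Option String :=
  (kindOf r).bind (lookupP P)

def firstsP (P : List (String × String)) (l : List (List (String × String))) : List (Int × String) :=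
  P.filterMap (fun p => (firstKindIndex l p.1).map (fun i => (i, p.2)))

def outP (P : List (String × String)) (l : List (List (String × String))) : List String :=
  (PySem.List.sorted (firstsP P l) (fun e => e.1)).map (fun e => e.2)

-- B's append-if-found loop over the pair table builds firstsP
theorem foldl_firsts (l : List (List (String × String))) :
    ∀ (P : List (String × String)) (acc : List (Int × String)),
      P.foldl (fun acc p =>
        match firstKindIndex l p.1 with
        | some i => acc ++ [(i, p.2)]
        | none => acc) acc = acc ++ firstsP P l := by
  intro P
  induction P with
  | nil => intro acc; simp [firstsP]
  | cons p t ih => intro acc; cases h : firstKindIndex l p.1 <;> simp [firstsP, h, ih]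

-- A's branch chain equals "look the kind up in the pair table, then Set.add".
theorem stepA_eq_add (inferred : List String) (request : List (String × String)) :
    (let kind := (PySem.Dict.mk request).get? "kind"
     if kind = some "weapon_sprite_set" ∧ "weapon_visual" ∉ inferred then
       inferred ++ ["weapon_visual"]
     else if kind = some "enemy_sprite_set" ∧ "enemy_visual" ∉ inferred then
       inferred ++ ["enemy_visual"]
     else if kind = some "hud_patch_set" ∧ "presentation_fx" ∉ inferred then
       inferred ++ ["presentation_fx"]
     else if kind = some "sound_pack" ∧ "weapon_audio" ∉ inferred then
       inferred ++ ["weapon_audio"]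
     else inferred) =
    (famOf kindFamilyPairs request).elim inferred (PySem.Set.add inferred) := by
  cases h : (PySem.Dict.mk request).get? "kind" with
  | none => simp [famOf, kindOf, h]
  | some k =>
    simp only [famOf, kindOf, h, Option.bind_some]
    by_cases h1 : k = "weapon_sprite_set"
    · subst h1; simp [lookupP, kindFamilyPairs, PySem.Set.add, PySem.Set.contains]
    · by_cases h2 : k = "enemy_sprite_set"
      · subst h2; simp [lookupP, kindFamilyPairs, PySem.Set.add, PySem.Set.contains]
      · by_cases h3 : k = "hud_patch_set"
        · subst h3; simp [lookupP, kindFamilyPairs, PySem.Set.add, PySem.Set.contains]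
        · by_cases h4 : k = "sound_pack"
          · subst h4; simp [lookupP, kindFamilyPairs, PySem.Set.add, PySem.Set.contains]
          · simp [lookupP, kindFamilyPairs, h1, h2, h3, h4,
              Ne.symm h1, Ne.symm h2, Ne.symm h3, Ne.symm h4]

-- folding a filterMap = folding with an optional step
theorem foldl_filterMap' {α β γ : Type} (f : α → Option β) (g : γ → β → γ) :
    ∀ (l : List α) (init : γ),
      (l.filterMap f).foldl g init =
        l.foldl (fun acc r => (f r).elim acc (g acc)) init := by
  intro l
  induction l with
  | nil => intro init; rfl
  | cons r t ih =>
    intro init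
    cases h : f r <;> simp [h, ih]


-- enumerate with a shifted start is a shifted enumerate
theorem enumerate_shift {α : Type} (xs : List α) : ∀ (s : Int),
    PySem.List.enumerate xs (s + 1) = (PySem.List.enumerate xs s).map (fun e => (e.1 + 1, e.2)) := by
  induction xs with
  | nil => intro s; simp [PySem.List.enumerate_nil]
  | cons x t ih => intro s; rw [PySem.List.enumerate_cons, PySem.List.enumerate_cons, ih]; simp

-- first-index recursion
theorem firstKindIndex_cons (r : List (String × String)) (t : List (List (String × String))) (k : String) :
    firstKindIndex (r :: t) k =
      if kindOf r = some k then some 0 else (firstKindIndex t k).map (fun i => i + 1) := by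
  unfold firstKindIndex
  rw [PySem.List.enumerate_cons]
  by_cases hk : kindOf r = some k
  · rw [List.find?_cons_of_pos (by simpa [kindOf] using hk)]
    simp [hk]
  · rw [List.find?_cons_of_neg (by simpa [kindOf] using hk)]
    rw [if_neg hk, show (0 : Int) + 1 = 0 + 1 from rfl, enumerate_shift, List.find?_map]
    cases hres : (PySem.List.enumerate t 0).find?
        (fun e => (PySem.Dict.mk e.2).get? "kind" == some k) with
    | none => simp [Function.comp_def, hres]
    | some e => simp [Function.comp_def, hres]

theorem firstKindIndex_nonneg (l : List (List (String × String))) (k : String) (i : Int)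
    (h : firstKindIndex l k = some i) : 0 ≤ i := by
  induction l generalizing i with
  | nil => simp [firstKindIndex, PySem.List.enumerate_nil] at h
  | cons r t ih =>
    rw [firstKindIndex_cons] at h
    split at h
    · simp at h; omega
    · cases hm : firstKindIndex t k with
      | none => rw [hm] at h; simp at h
      | some j => rw [hm] at h; simp at h; have := ih j hm; omega

theorem firstKindIndex_inj (l : List (List (String × String))) (k₁ k₂ : String) (i : Int)
    (h₁ : firstKindIndex l k₁ = some i) (h₂ : firstKindIndex l k₂ = some i) : k₁ = k₂ := by
  induction l generalizing i with
  | nil => simp [firstKindIndex, PySem.List.enumerate_nil] at h₁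
  | cons r t ih =>
    rw [firstKindIndex_cons] at h₁ h₂
    split at h₁ <;> split at h₂
    · rename_i c₁ c₂; rw [c₁] at c₂; exact (Option.some.injEq _ _ ▸ c₂).symm ▸ rfl
    · exfalso
      cases hm : firstKindIndex t k₂ with
      | none => rw [hm] at h₂; simp at h₂
      | some j =>
        rw [hm] at h₂; simp at h₂
        have := firstKindIndex_nonneg t k₂ j hm
        simp at h₁; omega
    · exfalso
      cases hm : firstKindIndex t k₁ with
      | none => rw [hm] at h₁; simp at h₁
      | some j =>
        rw [hm] at h₁; simp at h₁
        have := firstKindIndex_nonneg t k₁ j hm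
        simp at h₂; omega
    · cases hm₁ : firstKindIndex t k₁ with
      | none => rw [hm₁] at h₁; simp at h₁
      | some j₁ =>
        cases hm₂ : firstKindIndex t k₂ with
        | none => rw [hm₂] at h₂; simp at h₂
        | some j₂ =>
          rw [hm₁] at h₁; rw [hm₂] at h₂; simp at h₁ h₂
          have : j₁ = j₂ := by omega
          exact ih j₁ hm₁ (this ▸ hm₂)

-- adding elements already-seen-filtered does not change a Set fold
theorem foldl_add_filter (a : String) : ∀ (xs s : List String), a ∈ s →
    xs.foldl PySem.Set.add s = (xs.filter (fun x => x != a)).foldl PySem.Set.add s := by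
  intro xs
  induction xs with
  | nil => intro s _; rfl
  | cons x t ih =>
    intro s hs
    by_cases hx : x = a
    · subst hx
      have hadd : PySem.Set.add s x = s := by
        simp [PySem.Set.add, PySem.Set.contains, hs]
      simp only [List.filter_cons, bne_self_eq_false, List.foldl_cons, hadd]
      exact ih s hs
    · have hkeep : (x != a) = true := by simpa using hx
      simp only [List.filter_cons, hkeep, List.foldl_cons]
      have hmem : a ∈ PySem.Set.add s x := by
        simp only [PySem.Set.add, PySem.Set.contains]
        split <;> simp [hs]
      exact ih _ hmem

-- a Set fold from a head the tail avoids keeps that head in front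
theorem foldl_add_cons_notmem (a : String) : ∀ (xs s : List String), a ∉ xs →
    xs.foldl PySem.Set.add (a :: s) = a :: xs.foldl PySem.Set.add s := by
  intro xs
  induction xs with
  | nil => intro s _; rfl
  | cons x t ih =>
    intro s hnm
    have hx : x ≠ a := fun h => hnm (h ▸ List.mem_cons_self)
    have hstep : PySem.Set.add (a :: s) x = a :: PySem.Set.add s x := by
      by_cases hc : x ∈ s
      · simp [PySem.Set.add, PySem.Set.contains, hc]
      · simp [PySem.Set.add, PySem.Set.contains, hc, hx]
    rw [List.foldl_cons, List.foldl_cons, hstep]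
    exact ih _ (fun h => hnm (List.mem_cons_of_mem _ h))

-- dedup peels its head, removing later duplicates
theorem dedup_cons (a : String) (xs : List String) :
    PySem.List.dedup (a :: xs) = a :: PySem.List.dedup (xs.filter (fun x => x != a)) := by
  rw [PySem.List.dedup_eq_ofList, PySem.List.dedup_eq_ofList,
    PySem.Set.ofList_eq_foldl, PySem.Set.ofList_eq_foldl, List.foldl_cons]
  have h0 : PySem.Set.add [] a = [a] := by simp [PySem.Set.add, PySem.Set.contains]
  rw [h0, foldl_add_filter a xs [a] (by simp),
    foldl_add_cons_notmem a (xs.filter (fun x => x != a)) []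
      (by intro hmem; simpa using (List.mem_filter.mp hmem).2)]

-- insertion commutes with the index shift
theorem insertBy_shift (x : Int × String) : ∀ (ys : List (Int × String)),
    PySem.List.insertBy (fun a b => decide (a.1 < b.1)) (x.1 + 1, x.2)
        (ys.map (fun e => (e.1 + 1, e.2)))
      = (PySem.List.insertBy (fun a b => decide (a.1 < b.1)) x ys).map
          (fun e => (e.1 + 1, e.2)) := by
  intro ys
  induction ys with
  | nil => rfl
  | cons y t ih =>
    simp only [List.map_cons, PySem.List.insertBy]
    have hd : (decide (x.1 + 1 < y.1 + 1)) = (decide (x.1 < y.1)) := by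
      simp
    rw [hd]
    by_cases h : x.1 < y.1
    · simp [h]
    · simp [h, ih]

-- sorting commutes with the index shift (i, f) ↦ (i+1, f)
theorem sorted_map_shift (xs : List (Int × String)) :
    PySem.List.sorted (xs.map (fun e => (e.1 + 1, e.2))) (fun e => e.1)
      = (PySem.List.sorted xs (fun e => e.1)).map (fun e => (e.1 + 1, e.2)) := by
  rw [PySem.List.sorted_eq_foldl_insertBy, PySem.List.sorted_eq_foldl_insertBy, List.foldl_map]
  have key : ∀ (l acc : List (Int × String)),
      l.foldl (fun acc x => PySem.List.insertBy
          (fun a b => decide (a.1 < b.1)) (x.1 + 1, x.2) acc) (acc.map (fun e => (e.1 + 1, e.2)))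
        = (l.foldl (fun acc x => PySem.List.insertBy
            (fun a b => decide (a.1 < b.1)) x acc) acc).map (fun e => (e.1 + 1, e.2)) := by
    intro l
    induction l with
    | nil => intro acc; rfl
    | cons x t ih =>
      intro acc
      rw [List.foldl_cons, List.foldl_cons, ← ih, insertBy_shift]
  have h0 := key xs []
  simp only [List.map_nil] at h0
  rw [← h0]

-- table-lookup facts
theorem famOf_none_no_kind (P : List (String × String)) (r : List (String × String))
    (h : famOf P r = none) : ∀ p ∈ P, kindOf r ≠ some p.1 := by
  intro p hp
  cases hko : kindOf r with
  | none => simp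
  | some k =>
    simp only [famOf, hko, Option.bind_some] at h
    intro hc
    have hk : p.1 = k := by injection hc with h'; exact h'.symm
    have hfind : P.find? (fun q => q.1 == k) = none := by
      unfold lookupP at h
      cases hf : P.find? (fun q => q.1 == k) with
      | none => rfl
      | some q => rw [hf] at h; simp at h
    have := List.find?_eq_none.mp hfind p hp
    simp [hk] at this

theorem famOf_some_spec (P : List (String × String)) (r : List (String × String)) (fm : String)
    (h : famOf P r = some fm) : ∃ k, kindOf r = some k ∧ lookupP P k = some fm := by
  cases hko : kindOf r with
  | none => simp [famOf, hko] at h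
  | some k => exact ⟨k, rfl, by simpa [famOf, hko] using h⟩

theorem lookupP_mem (P : List (String × String)) (k fm : String)
    (h : lookupP P k = some fm) : (k, fm) ∈ P := by
  unfold lookupP at h
  cases hf : P.find? (fun q => q.1 == k) with
  | none => rw [hf] at h; simp at h
  | some q =>
    rw [hf] at h
    simp only [Option.map_some, Option.some.injEq] at h
    have hq1 : q.1 = k := by simpa using List.find?_some hf
    have hq : q = (k, fm) := by cases q; simp_all
    exact hq ▸ List.mem_of_find?_eq_some hf

theorem lookupP_filter_ne (P : List (String × String)) (k k0 : String) (h : k ≠ k0) :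
    lookupP (P.filter (fun p => p.1 != k0)) k = lookupP P k := by
  unfold lookupP
  congr 1
  induction P with
  | nil => rfl
  | cons p t ih =>
    rw [List.filter_cons]
    by_cases hp : p.1 = k0
    · have hdrop : (p.1 != k0) = false := by simp [hp]
      rw [hdrop, if_neg (by simp)]
      conv_rhs => rw [List.find?_cons]
      have hfalse : (p.1 == k) = false := by simp [hp]; exact fun he => h he.symm
      simp only [hfalse]
      exact ih
    · have hkeep : (p.1 != k0) = true := by simp [hp]
      rw [hkeep, if_pos rfl]
      by_cases hpk : p.1 = k
      · rw [List.find?_cons_of_pos (by simp [hpk]), List.find?_cons_of_pos (by simp [hpk])]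
      · rw [List.find?_cons_of_neg (by simp [hpk]), List.find?_cons_of_neg (by simp [hpk]), ih]

theorem lookupP_filter_self (P : List (String × String)) (k0 : String) :
    lookupP (P.filter (fun p => p.1 != k0)) k0 = none := by
  unfold lookupP
  rw [List.find?_eq_none.mpr]
  · rfl
  · intro q hq
    have h2 := (List.mem_filter.mp hq).2
    simp only [beq_iff_eq]
    intro he
    simp [he] at h2

-- firstsP facts
theorem firstsP_cons_none (P : List (String × String)) (r : List (String × String))
    (t : List (List (String × String))) (hno : ∀ p ∈ P, kindOf r ≠ some p.1) :
    firstsP P (r :: t) = (firstsP P t).map (fun e => (e.1 + 1, e.2)) := by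
  unfold firstsP
  rw [List.map_filterMap]
  apply List.filterMap_congr
  intro p hp
  rw [firstKindIndex_cons, if_neg (hno p hp)]
  cases firstKindIndex t p.1 <;> simp

theorem mem_firstsP_nonneg (P : List (String × String)) (l : List (List (String × String)))
    (e : Int × String) (h : e ∈ firstsP P l) : 0 ≤ e.1 := by
  obtain ⟨p, _, hpe⟩ := List.mem_filterMap.mp h
  cases hf : firstKindIndex l p.1 with
  | none => rw [hf] at hpe; simp at hpe
  | some i =>
    rw [hf] at hpe
    simp only [Option.map_some, Option.some.injEq] at hpe
    have := firstKindIndex_nonneg l p.1 i hf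
    rw [← hpe]
    simpa using this

theorem pairwise_ne_firstsP (P : List (String × String)) (l : List (List (String × String)))
    (hk : (P.map Prod.fst).Nodup) : (firstsP P l).Pairwise (fun a b => a.1 ≠ b.1) := by
  have hP : P.Pairwise (fun p q => p.1 ≠ q.1) := List.pairwise_map.mp hk
  apply List.pairwise_filterMap.mpr
  apply hP.imp
  intro p q hpq b hb b' hb'
  cases hf : firstKindIndex l p.1 with
  | none => rw [hf] at hb; simp at hb
  | some i =>
    cases hf' : firstKindIndex l q.1 with
    | none => rw [hf'] at hb'; simp at hb'
    | some j =>
      rw [hf] at hb; rw [hf'] at hb'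
      simp only [Option.map_some, Option.some.injEq] at hb hb'
      rw [← hb, ← hb']
      intro hij
      have hij' : i = j := hij
      exact hpq (firstKindIndex_inj l p.1 q.1 i hf (by rw [hij']; exact hf'))

theorem sorted_firstsP_pairwise_lt (P : List (String × String))
    (l : List (List (String × String))) (hk : (P.map Prod.fst).Nodup) :
    (PySem.List.sorted (firstsP P l) (fun e => e.1)).Pairwise (fun a b => a.1 < b.1) := by
  have hle := PySem.List.sorted_pairwise (firstsP P l) (fun e => e.1)
  have hperm := PySem.List.sorted_perm (firstsP P l) (fun e => e.1) false
  have hne : (PySem.List.sorted (firstsP P l) (fun e => e.1)).Pairwise (fun a b => a.1 ≠ b.1) :=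
    (List.Perm.pairwise_iff (fun h => h.symm) hperm).mpr (pairwise_ne_firstsP P l hk)
  exact (hle.and hne).imp (fun h => lt_of_le_of_ne h.1 h.2)

-- the main induction: for any pair table with distinct kinds and distinct families,
-- A's first-occurrence dedup equals B's sort-by-first-index
theorem main_lemma (l : List (List (String × String))) : ∀ (P : List (String × String)),
    (P.map Prod.fst).Nodup → (P.map Prod.snd).Nodup →
    PySem.List.dedup (l.filterMap (famOf P)) = outP P l := by
  induction l with
  | nil =>
    intro P _ _
    have hnil : firstsP P [] = [] := by
      unfold firstsP
      rw [List.filterMap_eq_nil_iff.mpr]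
      intro p _
      simp [firstKindIndex, PySem.List.enumerate_nil]
    unfold outP
    rw [List.filterMap_nil, hnil, PySem.List.sorted_eq_foldl_insertBy]
    rfl
  | cons r t ih =>
    intro P hk hv
    cases hfam : famOf P r with
    | none =>
      rw [List.filterMap_cons_none hfam]
      unfold outP
      rw [firstsP_cons_none P r t (famOf_none_no_kind P r hfam), sorted_map_shift, List.map_map]
      exact ih P hk hv
    | some fm0 =>
      obtain ⟨k0, hko, hlk⟩ := famOf_some_spec P r fm0 hfam
      have hmem : (k0, fm0) ∈ P := lookupP_mem P k0 fm0 hlk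
      have hsub : (P.filter (fun p => p.1 != k0)).Sublist P := List.filter_sublist
      have hk' : ((P.filter (fun p => p.1 != k0)).map Prod.fst).Nodup := hk.sublist (hsub.map _)
      have hv' : ((P.filter (fun p => p.1 != k0)).map Prod.snd).Nodup := hv.sublist (hsub.map _)
      -- LHS: peel fm0 and switch to the reduced table
      rw [List.filterMap_cons_some hfam, dedup_cons, List.filter_filterMap]
      have hpoint : ∀ x ∈ t, Option.filter (fun y => y != fm0) (famOf P x)
          = famOf (P.filter (fun p => p.1 != k0)) x := by
        intro x _
        cases hkx : kindOf x with
        | none => simp [famOf, hkx]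
        | some k =>
          by_cases hkk : k = k0
          · subst hkk
            simp [famOf, hkx, hlk, lookupP_filter_self, Option.filter]
          · cases hl : lookupP P k with
            | none => simp [famOf, hkx, lookupP_filter_ne P k k0 hkk, hl]
            | some fm =>
              have hne : fm ≠ fm0 := by
                intro he
                have hmem' : (k, fm) ∈ P := lookupP_mem P k fm hl
                have heq : (k, fm) = (k0, fm0) :=
                  List.inj_on_of_nodup_map hv hmem' hmem (by simp [he])
                exact hkk (by simpa using congrArg Prod.fst heq)
              simp [famOf, hkx, lookupP_filter_ne P k k0 hkk, hl, Option.filter, hne]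
      rw [List.filterMap_congr hpoint, ih (P.filter (fun p => p.1 != k0)) hk' hv']
      -- RHS: the sorted firsts of (r :: t) put (0, fm0) in front of the shifted reduced firsts
      have hsorted : PySem.List.sorted (firstsP P (r :: t)) (fun e => e.1)
          = (0, fm0) :: (PySem.List.sorted (firstsP (P.filter (fun p => p.1 != k0)) t)
              (fun e => e.1)).map (fun e => (e.1 + 1, e.2)) := by
        obtain ⟨P₁, P₂, hPsplit⟩ := List.append_of_mem hmem
        have hknodup := hk
        rw [hPsplit, List.map_append, List.map_cons, List.nodup_append] at hknodup
        have hk0P₁ : ∀ p ∈ P₁, p.1 ≠ k0 := by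
          intro p hp he
          exact hknodup.2.2 p.1 (List.mem_map_of_mem (f := Prod.fst) hp) k0
            List.mem_cons_self he
        have hk0P₂ : ∀ p ∈ P₂, p.1 ≠ k0 := by
          intro p hp he
          have h1 := (List.nodup_cons.mp hknodup.2.1).1
          have h2 : k0 ∈ List.map Prod.fst P₂ := by
            rw [← he]; exact List.mem_map_of_mem (f := Prod.fst) hp
          exact h1 h2
        have hP'eq : P.filter (fun p => p.1 != k0) = P₁ ++ P₂ := by
          rw [hPsplit, List.filter_append, List.filter_cons]
          have hmid : (((k0, fm0) : String × String).1 != k0) = false := by simp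
          rw [hmid]
          rw [List.filter_eq_self.mpr (fun p hp => by simpa using hk0P₁ p hp),
            List.filter_eq_self.mpr (fun p hp => by simpa using hk0P₂ p hp)]
          simp
        have hside : ∀ (Q : List (String × String)), (∀ p ∈ Q, p.1 ≠ k0) →
            Q.filterMap (fun p => (firstKindIndex (r :: t) p.1).map (fun i => (i, p.2)))
              = (firstsP Q t).map (fun e => (e.1 + 1, e.2)) := by
          intro Q hQ
          unfold firstsP
          rw [List.map_filterMap]
          apply List.filterMap_congr
          intro p hp
          rw [firstKindIndex_cons, if_neg (by
            rw [hko]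
            intro hc
            exact hQ p hp (by injection hc with h'; exact h'.symm))]
          cases firstKindIndex t p.1 <;> simp
        have hfirsts : firstsP P (r :: t)
            = (firstsP P₁ t).map (fun e => (e.1 + 1, e.2))
              ++ (0, fm0) :: (firstsP P₂ t).map (fun e => (e.1 + 1, e.2)) := by
          have hmid0 : firstKindIndex (r :: t) ((k0, fm0) : String × String).1 = some 0 := by
            rw [firstKindIndex_cons, if_pos hko]
          rw [show firstsP P (r :: t) = P.filterMap
              (fun p => (firstKindIndex (r :: t) p.1).map (fun i => (i, p.2))) from rfl,
            hPsplit, List.filterMap_append, ← hside P₁ hk0P₁, ← hside P₂ hk0P₂]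
          simp [hmid0]
        have hZ : firstsP (P.filter (fun p => p.1 != k0)) t = firstsP P₁ t ++ firstsP P₂ t := by
          rw [hP'eq]
          unfold firstsP
          rw [List.filterMap_append]
        apply PySem.List.sorted_eq_of_perm_of_pairwise_lt
        · rw [hfirsts]
          refine List.Perm.trans ?_ List.perm_middle.symm
          apply List.Perm.cons
          rw [← List.map_append, ← hZ]
          exact (PySem.List.sorted_perm _ _ false).map _
        · apply List.pairwise_cons.mpr
          constructor
          · intro e he
            obtain ⟨e', he', rfl⟩ := List.mem_map.mp he
            have he'' : e' ∈ firstsP (P.filter (fun p => p.1 != k0)) t :=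
              (PySem.List.sorted_perm _ _ false).mem_iff.mp he'
            have := mem_firstsP_nonneg _ _ _ he''
            show ((0 : Int), fm0).1 < (e'.1 + 1, e'.2).1
            simp only
            omega
          · apply List.pairwise_map.mpr
            exact (sorted_firstsP_pairwise_lt _ t hk').imp (fun h => by
              simp only
              omega)
      unfold outP
      rw [hsorted, List.map_cons, List.map_map]
      rfl

-- ===== VERDICT =====
theorem infer_families_from_assets_spec : Claim_equal_infer_families_from_assets := by
  intro ars _
  unfold Spec_infer_families_from_assets infer_families_from_assets infer_families_from_assets_alt
  have h : (fun (inferred : List String) (request : List (String × String)) =>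
      let kind := (PySem.Dict.mk request).get? "kind"
      if kind = some "weapon_sprite_set" ∧ "weapon_visual" ∉ inferred then
        inferred ++ ["weapon_visual"]
      else if kind = some "enemy_sprite_set" ∧ "enemy_visual" ∉ inferred then
        inferred ++ ["enemy_visual"]
      else if kind = some "hud_patch_set" ∧ "presentation_fx" ∉ inferred then
        inferred ++ ["presentation_fx"]
      else if kind = some "sound_pack" ∧ "weapon_audio" ∉ inferred then
        inferred ++ ["weapon_audio"]
      else inferred) =
      (fun acc r => (famOf kindFamilyPairs r).elim acc (PySem.Set.add acc)) :=
    funext fun i => funext fun r => stepA_eq_add i r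
  rw [h, ← foldl_filterMap' (famOf kindFamilyPairs) PySem.Set.add,
    ← PySem.Set.ofList_eq_foldl, ← PySem.List.dedup_eq_ofList]
  simp only [foldl_firsts ars, List.nil_append]
  exact main_lemma ars kindFamilyPairs (by decide) (by decide)
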